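-- pv_equiv track=rewrite | github.com/SpiNNakerManchester/PACMAN | pacman/operations/router_check_functionality/valid_routes_checker.py | _in_chip_scope
-- ===== SOURCE A (Python) =====
-- def _in_chip_scope(route_value):
--     """
--     returns a chip link or none based on if the route value travels
--     down a spinn link
--     """
--     link_ids = list()
--     masked_off_values = route_value & 0x3F
--     if masked_off_values == 0:
--         return None
--     else:
--         masks = [0x1, 0x2, 0x4, 0x8, 0x10, 0x20]
--         link_id = 0
--         for mask in masks:
--             final_mask_value = (masked_off_values & mask) >> link_id
--             if final_mask_value == 1:
--                 link_ids.append(link_id)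
--             link_id += 1
--         return link_ids
-- ===== SOURCE B (Python) =====
-- def _in_chip_scope(route_value):
--     """Lowest-set-bit iteration over the low 6 bits (idiomatic; visits only set bits)."""
--     masked = route_value & 0x3F
--     if masked == 0:
--         return None
--     link_ids = []
--     v = masked
--     while v:
--         low = v & -v
--         link_ids.append(low.bit_length() - 1)
--         v &= v - 1
--     return link_ids
-- ===== Notes on version B (the rewrite author's own statement) =====
-- stated objective: idiomatic
-- what changed: Replaces the fixed scan over all six mask positions (shift-and-test per position with a running link_id counter) by the standard lowest-set-bit idiom (v & -v / bit_length / v &= v-1), visiting only the bits that are actually set.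
import Mathlib
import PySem

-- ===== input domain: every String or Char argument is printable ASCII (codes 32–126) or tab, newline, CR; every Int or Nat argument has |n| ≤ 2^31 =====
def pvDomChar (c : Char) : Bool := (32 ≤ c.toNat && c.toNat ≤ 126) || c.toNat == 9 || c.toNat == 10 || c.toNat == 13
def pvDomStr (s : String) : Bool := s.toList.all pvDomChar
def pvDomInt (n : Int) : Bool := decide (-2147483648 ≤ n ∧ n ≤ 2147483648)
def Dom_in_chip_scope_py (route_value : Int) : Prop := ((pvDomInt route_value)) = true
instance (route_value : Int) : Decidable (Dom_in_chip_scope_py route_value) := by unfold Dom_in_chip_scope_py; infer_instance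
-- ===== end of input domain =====

-- B replaces A's fixed scan over six mask positions by the lowest-set-bit idiom (idiomatic; same values).

-- ===== PORT A =====
-- 'for mask in masks' loop of A: state = (link_ids, link_id)
def inChipScopeA_go (masked : Int) : List Int → List Int → Int → List Int
  | [], link_ids, _ => link_ids
  | mask :: rest, link_ids, link_id =>
      let final_mask_value := (PySem.Int.band masked mask) >>> link_id.toNat
      if final_mask_value = 1 then
        inChipScopeA_go masked rest (link_ids ++ [link_id]) (link_id + 1)
      else
        inChipScopeA_go masked rest link_ids (link_id + 1)

def in_chip_scope_py (route_value : Int) : Option (List Int) :=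
  let link_ids : List Int := []
  let masked_off_values := PySem.Int.band route_value 0x3F
  if masked_off_values = 0 then none
  else
    let masks : List Int := [0x1, 0x2, 0x4, 0x8, 0x10, 0x20]
    some (inChipScopeA_go masked_off_values masks link_ids 0)

-- ===== PORT B =====
-- 'while v:' loop of B; v is always nonnegative here (it starts as route_value & 0x3F ≥ 0
-- and only loses bits), so the guard 'while v' is ported as 0 < v; fuel = v.toNat bounds the
-- iteration count (v strictly decreases each step) and is never exhausted.
def inChipScopeB_while (fuel : Nat) (v : Int) : List Int :=
  match fuel with
  | 0 => []
  | f + 1 =>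
    if 0 < v then
      let low := PySem.Int.band v (-v)
      ((PySem.Int.bitLength low : Int) - 1) :: inChipScopeB_while f (PySem.Int.band v (v - 1))
    else []

def in_chip_scope_py_alt (route_value : Int) : Option (List Int) :=
  let masked := PySem.Int.band route_value 0x3F
  if masked = 0 then none
  else some (inChipScopeB_while masked.toNat masked)

-- ===== PRECONDITION & SPEC =====
def Spec_in_chip_scope_py (route_value : Int) (out : Option (List Int)) : Prop := out = in_chip_scope_py_alt route_value
instance (route_value : Int) (out : Option (List Int)) : Decidable (Spec_in_chip_scope_py route_value out) := by unfold Spec_in_chip_scope_py; infer_instance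

-- ===== CLAIM (what is proved, stated in full; the proofs are below) =====
def Claim_equal_in_chip_scope_py : Prop := ∀ (route_value : Int), Dom_in_chip_scope_py route_value → Spec_in_chip_scope_py route_value (in_chip_scope_py route_value)

-- ===== LEMMAS AND PROOFS =====

-- route_value & 0x3F always lies in [0, 64), for every sign of route_value
theorem band63_bounds (a : Int) : 0 ≤ PySem.Int.band a 63 ∧ PySem.Int.band a 63 < 64 := by
  unfold PySem.Int.band
  split_ifs with h1 h2 h2
  · have := Nat.and_le_right (n := a.toNat) (m := (63 : Int).toNat)
    omega
  · omega
  · have : (63 : Int).toNat - ((63 : Int).toNat &&& (-a - 1).toNat) ≤ (63 : Int).toNat :=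
      Nat.sub_le _ _
    omega
  · omega

-- both ports factor through the masked value, which lets us decide all 64 cases
theorem core_eq (m : Int) (h0 : 0 ≤ m) (h1 : m < 64) :
    (if m = 0 then none else some (inChipScopeA_go m [1, 2, 4, 8, 16, 32] [] 0)) =
    (if m = 0 then none else some (inChipScopeB_while m.toNat m)) := by
  interval_cases m <;> rfl

-- ===== VERDICT (by name: the statement is the Claim_ definition above) =====
theorem in_chip_scope_py_spec : Claim_equal_in_chip_scope_py := by
  intro rv _
  unfold Spec_in_chip_scope_py in_chip_scope_py in_chip_scope_py_alt
  have := band63_bounds rv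
  exact core_eq _ this.1 this.2
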